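-- pv_equiv track=rewrite | github.com/muribe0/TDA | Dinamica/scheduling_pesos.py | reconstruirSolucion
-- ===== SOURCE A (Python) =====
-- def reconstruirSolucion(M, charlas, p):
--     i = len(charlas) - 1
--     solucion = []
--     while i >= 0:
--         if (p[i] >= 0 and  M[i] == M[p[i]] + charlas[i][2]) or (p[i] < 0 and M[i] == charlas[i][2]):
--             solucion.append(i)
--             i = p[i]
--         else:
--             i -= 1
--     return solucion
-- ===== SOURCE B (Python) =====
-- def reconstruirSolucion(M, charlas, p):
--     # Recursive backtrace: find the nearest marked DP entry at or below i,
--     # emit it and recurse on its predecessor; builds the list front-to-back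
--     # by consing instead of appending to an accumulator.
--     def elegible(j):
--         return (p[j] >= 0 and M[j] == M[p[j]] + charlas[j][2]) or (p[j] < 0 and M[j] == charlas[j][2])
--
--     def rec(i):
--         j = next((k for k in range(i, -1, -1) if elegible(k)), -1)
--         if j < 0:
--             return []
--         return [j] + rec(p[j])
--
--     return rec(len(charlas) - 1)
-- ===== Notes on version B (the rewrite author's own statement) =====
-- stated objective: alternative
-- what changed: Replaces A's single iterative two-branch loop with append accumulator by a recursive backtrace: a search for the nearest marked DP entry at or below i (next over a reversed range) followed by a cons and a recursive call on its predecessor, building the list front-to-back with no accumulator.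
-- outside the precondition, e.g. on reconstruirSolucion([1, 1], [(0, 0, 1), (0, 0, 1)], [5, -1]): A returns [1], B returns [1]; on reconstruirSolucion([1, 10, 7], [(0, 0, 1), (0, 0, 3), (0, 0, 7)], [-1, 2, -1]): A returns [2], B returns [2]
import Mathlib
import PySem

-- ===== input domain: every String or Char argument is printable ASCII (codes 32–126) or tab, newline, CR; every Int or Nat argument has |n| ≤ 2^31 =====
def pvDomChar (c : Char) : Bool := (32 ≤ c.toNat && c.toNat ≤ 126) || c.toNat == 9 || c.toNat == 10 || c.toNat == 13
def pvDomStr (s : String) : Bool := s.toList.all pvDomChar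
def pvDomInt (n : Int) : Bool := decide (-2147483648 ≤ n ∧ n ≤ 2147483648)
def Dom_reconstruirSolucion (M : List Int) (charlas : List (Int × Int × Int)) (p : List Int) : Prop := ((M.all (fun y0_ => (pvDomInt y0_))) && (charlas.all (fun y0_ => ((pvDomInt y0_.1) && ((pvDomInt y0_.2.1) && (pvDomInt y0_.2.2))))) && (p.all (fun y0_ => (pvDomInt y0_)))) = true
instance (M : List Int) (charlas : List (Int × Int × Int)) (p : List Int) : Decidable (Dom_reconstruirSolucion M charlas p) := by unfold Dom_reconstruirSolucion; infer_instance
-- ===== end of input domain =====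

-- B replaces A's iterative two-branch backtrace with an append accumulator by a
-- recursive one: search the nearest marked entry at or below i, cons it, recurse
-- on its predecessor (objective: alternative decomposition, same complexity).

-- ===== PORT A =====
-- the while loop of A, fuel-bounded structural recursion over the same state (i, solucion)
def loopA (M : List Int) (charlas : List (Int × Int × Int)) (p : List Int) : Nat → Int → List Int → List Int
  | 0, _, sol => sol
  | f + 1, i, sol =>
    if i ≥ 0 then
      if (PySem.List.pyGetD p i 0 ≥ 0 ∧
            PySem.List.pyGetD M i 0 =
              PySem.List.pyGetD M (PySem.List.pyGetD p i 0) 0 + (PySem.List.pyGetD charlas i (0,0,0)).2.2)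
         ∨ (PySem.List.pyGetD p i 0 < 0 ∧
            PySem.List.pyGetD M i 0 = (PySem.List.pyGetD charlas i (0,0,0)).2.2) then
        loopA M charlas p f (PySem.List.pyGetD p i 0) (sol ++ [i])
      else
        loopA M charlas p f (i - 1) sol
    else sol

def reconstruirSolucion (M : List Int) (charlas : List (Int × Int × Int)) (p : List Int) : List Int :=
  loopA M charlas p (charlas.length + 1) ((charlas.length : Int) - 1) []

-- ===== PORT B =====
-- Source B's helper `elegible(j)`
abbrev elegible (M : List Int) (charlas : List (Int × Int × Int)) (p : List Int) (j : Int) : Prop :=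
  (PySem.List.pyGetD p j 0 ≥ 0 ∧
     PySem.List.pyGetD M j 0 =
       PySem.List.pyGetD M (PySem.List.pyGetD p j 0) 0 + (PySem.List.pyGetD charlas j (0,0,0)).2.2)
  ∨ (PySem.List.pyGetD p j 0 < 0 ∧
     PySem.List.pyGetD M j 0 = (PySem.List.pyGetD charlas j (0,0,0)).2.2)

-- Source B's `next((k for k in range(i, -1, -1) if elegible(k)), -1)`: first eligible index ≤ i, else -1
def scanB (M : List Int) (charlas : List (Int × Int × Int)) (p : List Int) : Nat → Int → Int
  | 0, _ => -1
  | f + 1, i =>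
    if i < 0 then -1
    else if elegible M charlas p i then i
    else scanB M charlas p f (i - 1)

-- Source B's `rec(i)`: cons the found talk, recurse on its predecessor
def recB (M : List Int) (charlas : List (Int × Int × Int)) (p : List Int) : Nat → Int → List Int
  | 0, _ => []
  | f + 1, i =>
    let j := scanB M charlas p (charlas.length + 1) i
    if j < 0 then []
    else j :: recB M charlas p f (PySem.List.pyGetD p j 0)

def reconstruirSolucion_alt (M : List Int) (charlas : List (Int × Int × Int)) (p : List Int) : List Int :=
  recB M charlas p (charlas.length + 1) ((charlas.length : Int) - 1)

-- ===== PRECONDITION & SPEC =====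
-- Pre_ excludes the inputs on which A can raise IndexError or loop forever (some
-- list too short, a pointer p[j] out of range, or a marked entry j whose pointer
-- does not decrease, p[j] ≥ j); on excluded inputs where A nevertheless returns
-- (the offending index is never visited by the backtrace) the Python B returns
-- the identical value — the exclusion exists only because the Lean ports are
-- fuel-bounded, so Pre_ is a checkable sufficient termination condition.
def Pre_reconstruirSolucion (M : List Int) (charlas : List (Int × Int × Int)) (p : List Int) : Prop :=
  charlas.length ≤ M.length ∧ charlas.length ≤ p.length ∧
    ∀ j < charlas.length,
      (0 ≤ p.getD j 0 → p.getD j 0 < (charlas.length : Int)) ∧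
      (elegible M charlas p (j : Int) → p.getD j 0 < (j : Int))
instance (M : List Int) (charlas : List (Int × Int × Int)) (p : List Int) : Decidable (Pre_reconstruirSolucion M charlas p) := by unfold Pre_reconstruirSolucion; infer_instance

def pvWitness_reconstruirSolucion : List Int × (List (Int × Int × Int)) × List Int :=
  ([3, 5], [(0, 1, 3), (1, 2, 2)], [-1, 0])

def Spec_reconstruirSolucion (M : List Int) (charlas : List (Int × Int × Int)) (p : List Int) (out : List Int) : Prop := out = reconstruirSolucion_alt M charlas p
instance (M : List Int) (charlas : List (Int × Int × Int)) (p : List Int) (out : List Int) : Decidable (Spec_reconstruirSolucion M charlas p out) := by unfold Spec_reconstruirSolucion; infer_instance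

-- ===== CLAIM (what is proved, stated in full; the proofs are below) =====
def Claim_equal_reconstruirSolucion : Prop := ∀ (M : List Int) (charlas : List (Int × Int × Int)) (p : List Int), Dom_reconstruirSolucion M charlas p → Pre_reconstruirSolucion M charlas p → Spec_reconstruirSolucion M charlas p (reconstruirSolucion M charlas p)

-- ===== LEMMAS AND PROOFS =====

-- scanB is fuel-irrelevant once the fuel exceeds the scan length
lemma scanB_fuel (M : List Int) (charlas : List (Int × Int × Int)) (p : List Int) :
    ∀ f g : Nat, ∀ i : Int, (i + 1).toNat < f → (i + 1).toNat < g →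
      scanB M charlas p f i = scanB M charlas p g i := by
  intro f
  induction f with
  | zero => intro g i hf; omega
  | succ f ih =>
    intro g i hf hg
    cases g with
    | zero => omega
    | succ g =>
      rw [scanB, scanB]
      by_cases h0 : i < 0
      · rw [if_pos h0, if_pos h0]
      · rw [if_neg h0, if_neg h0]
        by_cases hc : elegible M charlas p i
        · rw [if_pos hc, if_pos hc]
        · rw [if_neg hc, if_neg hc]
          exact ih g (i - 1) (by omega) (by omega)

lemma main_loop (M : List Int) (charlas : List (Int × Int × Int)) (p : List Int)
    (pre : Pre_reconstruirSolucion M charlas p) :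
    ∀ k : Nat, ∀ i : Int, i < charlas.length → (i + 1).toNat ≤ k →
      ∀ fa fr : Nat, k + 1 ≤ fa → k + 1 ≤ fr → ∀ sol : List Int,
        loopA M charlas p fa i sol = sol ++ recB M charlas p fr i := by
  obtain ⟨hM, hp, hpred⟩ := pre
  intro k
  induction k with
  | zero =>
    intro i hin hk fa fr hfa hfr sol
    have hineg : i < 0 := by omega
    cases fa with
    | zero => omega
    | succ fa' =>
      cases fr with
      | zero => omega
      | succ fr' =>
        rw [loopA, if_neg (by omega), recB]
        have hscan : scanB M charlas p (charlas.length + 1) i = -1 := by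
          cases hn : charlas.length + 1 with
          | zero => omega
          | succ m => rw [scanB, if_pos hineg]
        simp only [hscan]
        norm_num
  | succ k ih =>
    intro i hin hk fa fr hfa hfr sol
    cases fa with
    | zero => omega
    | succ fa' =>
      cases fr with
      | zero => omega
      | succ fr' =>
        by_cases hi : 0 ≤ i
        · have hitn : (i.toNat : Int) = i := Int.toNat_of_nonneg hi
          have hiln : i.toNat < charlas.length := by omega
          have hpi : PySem.List.pyGetD p i 0 = p.getD i.toNat 0 := by
            rw [← hitn, PySem.List.pyGetD_natCast]
            have h2 : (max i 0).toNat = i.toNat := by omega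
            simp [h2]
          rw [loopA, if_pos (by omega)]
          by_cases hc : elegible M charlas p i
          · -- eligible: A takes; B's scan stops at i and B conses i
            have hpilt : PySem.List.pyGetD p i 0 < i := by
              have hcn : elegible M charlas p ((i.toNat : Int)) := by rw [hitn]; exact hc
              have := (hpred i.toNat hiln).2 hcn
              rw [hpi]; omega
            rw [if_pos hc]
            have hscan : scanB M charlas p (charlas.length + 1) i = i := by
              cases hn : charlas.length + 1 with
              | zero => omega
              | succ m => rw [scanB, if_neg (by omega), if_pos hc]
            rw [recB]
            simp only [hscan]
            rw [if_neg (by omega)]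
            rw [ih (PySem.List.pyGetD p i 0) (by omega) (by omega) fa' fr' (by omega) (by omega) (sol ++ [i])]
            simp
          · -- not eligible: A skips; B's scan steps past i, so recB is unchanged at i-1
            rw [if_neg hc]
            have hscan : scanB M charlas p (charlas.length + 1) i
                = scanB M charlas p (charlas.length + 1) (i - 1) := by
              cases hn : charlas.length + 1 with
              | zero => omega
              | succ m =>
                rw [scanB, if_neg (by omega), if_neg hc]
                exact scanB_fuel M charlas p m (m + 1) (i - 1) (by omega) (by omega)
            have hrec : recB M charlas p (fr' + 1) i = recB M charlas p (fr' + 1) (i - 1) := by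
              rw [recB, recB]
              simp only [hscan]
            rw [hrec]
            exact ih (i - 1) (by omega) (by omega) fa' (fr' + 1) (by omega) (by omega) sol
        · -- i < 0: both return immediately
          rw [loopA, if_neg (by omega), recB]
          have hscan : scanB M charlas p (charlas.length + 1) i = -1 := by
            cases hn : charlas.length + 1 with
            | zero => omega
            | succ m => rw [scanB, if_pos (by omega)]
          simp only [hscan]
          norm_num

-- ===== VERDICT (by name: the statement is the Claim_ definition above) =====
theorem reconstruirSolucion_spec : Claim_equal_reconstruirSolucion := by
  intro M charlas p _hdom hpre
  unfold Spec_reconstruirSolucion reconstruirSolucion reconstruirSolucion_alt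
  exact main_loop M charlas p hpre charlas.length ((charlas.length : Int) - 1)
    (by omega) (by omega) (charlas.length + 1) (charlas.length + 1) (by omega) (by omega) []
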